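-- pv_equiv track=rewrite | github.com/Rameshkrishnanb/bitcodes | codetask.py | mapping_file
-- ===== SOURCE A (Python) =====
-- from collections import defaultdict
-- from typing import Dict, List, Tuple
--
-- def mapping_file(row_list: List[Dict]) -> Tuple[Dict, Dict]:
--     low_strip = striping_lowering_review
--     aspect_review_dict = defaultdict(set)
--     review_aspect_dict = defaultdict(set)
--     for row in row_list:
--         aspect = low_strip(row["Aspect"])
--         review = low_strip(row["Review"])
--         aspect_review_dict[aspect].add(review)
--         review_aspect_dict[review].add(aspect)
--     return aspect_review_dict, review_aspect_dict
--
-- def striping_lowering_review(text: str) -> str: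
--     processed_text = text.strip().lower()
--     return processed_text
-- ===== SOURCE B (Python) =====
-- def striping_lowering_review(text: str) -> str:
--     return text.strip().lower()
--
--
-- def mapping_file(row_list):
--     # Normalise once; then, for each distinct key (first-occurrence order),
--     # rescan the pair list to collect its value set -- no incremental
--     # accumulator dict is ever updated.
--     pairs = [(striping_lowering_review(row["Aspect"]),
--               striping_lowering_review(row["Review"])) for row in row_list]
--
--     def side(ps):
--         return {k: {v for kk, v in ps if kk == k}
--                 for k in dict.fromkeys(k for k, _ in ps)}
--
--     return side(pairs), side([(v, k) for k, v in pairs])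
-- ===== Notes on version B (the rewrite author's own statement) =====
-- stated objective: alternative
-- what changed: A streams the rows once, incrementally updating two defaultdict(set) accumulators; B never maintains an accumulator: it normalises the rows into pairs, takes the distinct keys in first-occurrence order, and for each key rescans the whole pair list with a comprehension to collect its value set (brute-force per-key scan instead of single-pass hash accumulation).
import Mathlib
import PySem

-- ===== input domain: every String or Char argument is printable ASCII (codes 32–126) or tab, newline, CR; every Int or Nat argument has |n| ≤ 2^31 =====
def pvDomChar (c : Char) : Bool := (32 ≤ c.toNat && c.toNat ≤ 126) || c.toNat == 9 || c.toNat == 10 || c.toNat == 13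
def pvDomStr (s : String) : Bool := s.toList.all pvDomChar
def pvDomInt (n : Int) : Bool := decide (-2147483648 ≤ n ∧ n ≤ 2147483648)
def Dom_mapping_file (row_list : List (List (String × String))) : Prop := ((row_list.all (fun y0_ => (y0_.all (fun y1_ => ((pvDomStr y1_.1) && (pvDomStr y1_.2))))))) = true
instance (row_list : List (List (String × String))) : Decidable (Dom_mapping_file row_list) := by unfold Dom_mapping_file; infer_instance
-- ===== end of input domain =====

-- B replaces A's single streaming pass that incrementally updates two defaultdict(set)
-- accumulators by an accumulator-free scheme: normalise the rows into pairs, take the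
-- distinct keys in first-occurrence order, and for each key rescan the pair list to
-- collect its value set (objective: alternative algorithm, no speed claim).

-- ===== PORT A =====
-- striping_lowering_review: text.strip().lower()
def lowStrip (s : String) : String := PySem.Str.lower (PySem.Str.strip s)

-- row["Aspect"]: first-match assoc lookup; total form with "" default — exact under Pre_ (key present)
def rowGet (row : List (String × String)) (k : String) : String := (row.lookup k).getD ""

def mapping_file (row_list : List (List (String × String))) : (List (String × List String)) × (List (String × List String)) :=
  -- one loop over row_list; d[k].add(v) on a defaultdict(set) is modify k ∅ (add · v)
  let r := row_list.foldl
    (fun (s : PySem.Dict String (PySem.Set String) × PySem.Dict String (PySem.Set String)) row =>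
      let aspect := lowStrip (rowGet row "Aspect")
      let review := lowStrip (rowGet row "Review")
      (s.1.modify aspect PySem.Set.empty (fun t => PySem.Set.add t review),
       s.2.modify review PySem.Set.empty (fun t => PySem.Set.add t aspect)))
    (PySem.Dict.empty, PySem.Dict.empty)
  (r.1.items, r.2.items)

-- ===== PORT B =====
-- side(ps): {k: {v for kk, v in ps if kk == k} for k in dict.fromkeys(k for k, _ in ps)}
-- dict.fromkeys = PySem.List.dedup; the set comprehension is Set.ofList of the filtered values
def sideMap (ps : List (String × String)) : List (String × List String) :=
  (PySem.List.dedup (ps.map (fun p => p.1))).map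
    (fun k => (k, PySem.Set.ofList ((ps.filter (fun p => p.1 == k)).map (fun p => p.2))))

def mapping_file_alt (row_list : List (List (String × String))) : (List (String × List String)) × (List (String × List String)) :=
  let pairs := row_list.map (fun row => (lowStrip (rowGet row "Aspect"), lowStrip (rowGet row "Review")))
  (sideMap pairs, sideMap (pairs.map (fun p => (p.2, p.1))))

-- ===== PRECONDITION & SPEC =====
-- Pre_ excludes rows missing the "Aspect" or "Review" key, on which A raises KeyError.
def Pre_mapping_file (row_list : List (List (String × String))) : Prop :=
  (row_list.all (fun row => row.any (fun p => p.1 == "Aspect") && row.any (fun p => p.1 == "Review"))) = true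
instance (row_list : List (List (String × String))) : Decidable (Pre_mapping_file row_list) := by unfold Pre_mapping_file; infer_instance
def pvWitness_mapping_file : (List (List (String × String))) :=
  [[("Aspect", " A "), ("Review", "Good!")], [("Review", "ok"), ("Aspect", "a")]]

def Spec_mapping_file (row_list : List (List (String × String))) (out : (List (String × List String)) × (List (String × List String))) : Prop := out = mapping_file_alt row_list
instance (row_list : List (List (String × String))) (out : (List (String × List String)) × (List (String × List String))) : Decidable (Spec_mapping_file row_list out) := by unfold Spec_mapping_file; infer_instance

-- ===== CLAIM (what is proved, stated in full; the proofs are below) =====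
def Claim_equal_mapping_file : Prop := ∀ (row_list : List (List (String × String))), Dom_mapping_file row_list → Pre_mapping_file row_list → Spec_mapping_file row_list (mapping_file row_list)

-- ===== LEMMAS AND PROOFS =====

-- getD of a modify-add grouping fold: the set at k collects, after d's, the values of the pairs keyed k
theorem getD_foldl_modify_setAdd (ps : List (String × String)) (d : PySem.Dict String (PySem.Set String)) (k : String) :
    (ps.foldl (fun d p => d.modify p.1 PySem.Set.empty (fun t => PySem.Set.add t p.2)) d).getD k PySem.Set.empty
      = PySem.Set.update (d.getD k PySem.Set.empty) ((ps.filter (fun p => p.1 == k)).map (fun p => p.2)) := by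
  induction ps generalizing d with
  | nil => simp [PySem.Set.update]
  | cons p ps ih =>
    simp only [List.foldl_cons, ih, List.filter_cons]
    by_cases h : p.1 = k
    · simp [h, PySem.Set.update_cons]
    · simp [h, PySem.Dict.getD_modify, Ne.symm h]

-- the whole items list of the grouping fold is B's sideMap
theorem items_grouping_fold (ps : List (String × String)) :
    (ps.foldl (fun d p => d.modify p.1 PySem.Set.empty (fun t => PySem.Set.add t p.2)) PySem.Dict.empty).items
      = sideMap ps := by
  have hnd : (ps.foldl (fun d p => d.modify p.1 PySem.Set.empty (fun t => PySem.Set.add t p.2)) PySem.Dict.empty).keys.Nodup := by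
    exact PySem.Dict.nodup_keys_foldl_modify_key ps (fun p => p.1) PySem.Set.empty
      (fun d p => fun t => PySem.Set.add t p.2) PySem.Dict.empty (by simp)
  rw [PySem.Dict.items_eq_map_keys _ hnd PySem.Set.empty]
  rw [PySem.Dict.keys_foldl_modify_key]
  simp only [PySem.Dict.keys_empty, PySem.Set.update_nil_left, sideMap,
    PySem.List.dedup_eq_ofList]
  refine List.map_congr_left ?_
  intro k _
  rw [getD_foldl_modify_setAdd]
  simp [PySem.Dict.getD_empty, PySem.Set.update_nil_left]

-- ===== VERDICT (by name: the statement is the Claim_ definition above) =====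
theorem mapping_file_spec : Claim_equal_mapping_file := by
  intro row_list _ _
  unfold Spec_mapping_file mapping_file mapping_file_alt
  rw [PySem.List.foldl_prod_mk
    (fun (d : PySem.Dict String (PySem.Set String)) row =>
      d.modify (lowStrip (rowGet row "Aspect")) PySem.Set.empty (fun t => PySem.Set.add t (lowStrip (rowGet row "Review"))))
    (fun (d : PySem.Dict String (PySem.Set String)) row =>
      d.modify (lowStrip (rowGet row "Review")) PySem.Set.empty (fun t => PySem.Set.add t (lowStrip (rowGet row "Aspect"))))]
  have h1 := items_grouping_fold (row_list.map (fun row => (lowStrip (rowGet row "Aspect"), lowStrip (rowGet row "Review"))))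
  have h2 := items_grouping_fold ((row_list.map (fun row => (lowStrip (rowGet row "Aspect"), lowStrip (rowGet row "Review")))).map (fun p => (p.2, p.1)))
  simp only [List.foldl_map] at h1 h2
  dsimp only
  rw [h1, h2]
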